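-- pv_equiv track=rewrite | github.com/superchangme/snake-ai-algorithm | backend/phase4_hamilton_ai.py | build_hamiltonian_cycle
-- ===== SOURCE A (Python) =====
-- def build_hamiltonian_cycle(width, height):
--     """
--     为偶数宽高网格生成Hamilton回路（蛇形扫描法）。
--     返回 cycle_order[y][x] 和 cycle_path 列表。
--     """
--     assert width % 2 == 0 and height % 2 == 0
--     path = []
--     for x in range(width):
--         if x == 0:
--             for y in range(height):
--                 path.append((x, y))
--         elif x % 2 == 1:
--             for y in range(height - 1, 0, -1):
--                 path.append((x, y))
--         else:
--             for y in range(1, height):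
--                 path.append((x, y))
--     for x in range(width - 1, 0, -1):
--         path.append((x, 0))
--
--     assert len(path) == width * height
--     order = [[0] * width for _ in range(height)]
--     for i, (x, y) in enumerate(path):
--         order[y][x] = i
--     return order, path
-- ===== SOURCE B (Python) =====
-- def build_hamiltonian_cycle(width, height):
--     """
--     Closed-form variant: compute each cell's cycle index directly and write
--     path and order in one pass over the grid (no traversal-then-invert).
--     """
--     assert width % 2 == 0 and height % 2 == 0
--     n = width * height
--     path = [None] * n
--     order = [[0] * width for _ in range(height)]
--     for x in range(width):
--         for y in range(height):
--             if x == 0: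
--                 i = y
--             elif y >= 1:
--                 i = height + (x - 1) * (height - 1) + (height - 1 - y if x % 2 == 1 else y - 1)
--             else:
--                 i = height + (width - 1) * (height - 1) + (width - 1 - x)
--             order[y][x] = i
--             path[i] = (x, y)
--     assert all(p is not None for p in path)
--     return order, path
-- ===== Notes on version B (the rewrite author's own statement) =====
-- stated objective: alternative
-- what changed: B computes each cell's cycle index by a closed-form per-cell formula and writes order[y][x] and path[i] directly in one pass over the grid, instead of appending cells in snake-traversal order and then inverting the enumeration.
import Mathlib
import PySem

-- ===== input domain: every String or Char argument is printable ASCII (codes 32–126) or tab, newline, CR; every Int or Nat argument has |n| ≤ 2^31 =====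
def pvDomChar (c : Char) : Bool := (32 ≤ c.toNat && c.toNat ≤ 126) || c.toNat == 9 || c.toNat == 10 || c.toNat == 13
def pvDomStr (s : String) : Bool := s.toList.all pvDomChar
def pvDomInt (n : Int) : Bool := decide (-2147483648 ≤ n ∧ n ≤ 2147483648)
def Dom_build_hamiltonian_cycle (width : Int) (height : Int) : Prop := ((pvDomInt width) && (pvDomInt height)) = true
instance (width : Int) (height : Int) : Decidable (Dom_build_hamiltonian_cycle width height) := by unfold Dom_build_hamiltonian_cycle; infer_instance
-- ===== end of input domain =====

-- B computes each cell's cycle index by a closed-form per-cell formula and writes order[y][x]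
-- and path[i] directly in one pass over the grid, instead of appending cells in snake-traversal
-- order and then inverting the enumeration (objective: alternative algorithm, same cost).

-- ===== PORT A =====
-- (both of A's `assert`s raise AssertionError exactly outside Pre_ below; asserts have no other effect)
def build_hamiltonian_cycle (width : Int) (height : Int) : List (List Int) × (List (Int × Int)) :=
  let path : List (Int × Int) :=
    (PySem.List.pyRange 0 width 1).foldl (fun path x =>
      if x = 0 then
        (PySem.List.pyRange 0 height 1).foldl (fun p y => p ++ [(x, y)]) path
      else if PySem.Int.mod x 2 = 1 then
        (PySem.List.pyRange (height - 1) 0 (-1)).foldl (fun p y => p ++ [(x, y)]) path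
      else
        (PySem.List.pyRange 1 height 1).foldl (fun p y => p ++ [(x, y)]) path) []
  let path := (PySem.List.pyRange (width - 1) 0 (-1)).foldl (fun p x => p ++ [(x, (0 : Int))]) path
  let order : List (List Int) := List.replicate height.toNat (List.replicate width.toNat (0 : Int))
  let order := (PySem.List.enumerate path).foldl
      (fun o p => PySem.List.pySetD o p.2.2
        (PySem.List.pySetD (PySem.List.pyGetD o p.2.2 []) p.2.1 p.1)) order
  (order, path)

-- ===== PORT B =====
-- ((-1,-1) stands for Python's None placeholder in the preallocated path; on every Pre_ input
--  each slot is overwritten, so the placeholder is never part of the result)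
def build_hamiltonian_cycle_alt (width : Int) (height : Int) : List (List Int) × (List (Int × Int)) :=
  let n := width * height
  let path0 : List (Int × Int) := List.replicate n.toNat (-1, -1)
  let order0 : List (List Int) := List.replicate height.toNat (List.replicate width.toNat (0 : Int))
  let res := (PySem.List.pyRange 0 width 1).foldl (fun s x =>
      (PySem.List.pyRange 0 height 1).foldl (fun s y =>
        let i : Int :=
          if x = 0 then y
          else if 1 ≤ y then
            height + (x - 1) * (height - 1) +
              (if PySem.Int.mod x 2 = 1 then height - 1 - y else y - 1)
          else height + (width - 1) * (height - 1) + (width - 1 - x)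
        (PySem.List.pySetD s.1 y (PySem.List.pySetD (PySem.List.pyGetD s.1 y []) x i),
         PySem.List.pySetD s.2 i (x, y))) s) (order0, path0)
  (res.1, res.2)

-- ===== PRECONDITION & SPEC =====
-- Exactly the inputs on which both of A's asserts pass (A raises AssertionError on every other
-- input: odd width/height, and the degenerate sizes on which the built path misses w*h cells).
def Pre_build_hamiltonian_cycle (width : Int) (height : Int) : Prop :=
  PySem.Int.mod width 2 = 0 ∧ PySem.Int.mod height 2 = 0 ∧
  (width = 0 ∨ (width < 0 ∧ height = 0) ∨ (2 ≤ width ∧ 2 ≤ height))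
instance (width : Int) (height : Int) : Decidable (Pre_build_hamiltonian_cycle width height) := by
  unfold Pre_build_hamiltonian_cycle; infer_instance

def pvWitness_build_hamiltonian_cycle : Int × Int := (4, 2)

def Spec_build_hamiltonian_cycle (width : Int) (height : Int) (out : List (List Int) × (List (Int × Int))) : Prop := out = build_hamiltonian_cycle_alt width height
instance (width : Int) (height : Int) (out : List (List Int) × (List (Int × Int))) : Decidable (Spec_build_hamiltonian_cycle width height out) := by unfold Spec_build_hamiltonian_cycle; infer_instance

-- ===== CLAIM (what is proved, stated in full; the proofs are below) =====
def Claim_equal_build_hamiltonian_cycle : Prop := ∀ (width : Int) (height : Int), Dom_build_hamiltonian_cycle width height → Pre_build_hamiltonian_cycle width height → Spec_build_hamiltonian_cycle width height (build_hamiltonian_cycle width height)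

-- ===== LEMMAS AND PROOFS =====

-- ---- proof-side descriptions of the two programs ----

/-- The column of cells A appends for abscissa `x`. -/
def colA (h x : Int) : List (Int × Int) :=
  if x = 0 then (PySem.List.pyRange 0 h 1).map (fun y => (x, y))
  else if PySem.Int.mod x 2 = 1 then (PySem.List.pyRange (h - 1) 0 (-1)).map (fun y => (x, y))
  else (PySem.List.pyRange 1 h 1).map (fun y => (x, y))

/-- A's finished path, as a concatenation. -/
def pathSpec (w h : Int) : List (Int × Int) :=
  (PySem.List.pyRange 0 w 1).flatMap (colA h) ++
    ((PySem.List.pyRange (w - 1) 0 (-1)).map (fun x => (x, 0)))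

/-- B's closed-form cycle index of cell (x, y). -/
def idxZ (w h x y : Int) : Int :=
  if x = 0 then y
  else if 1 ≤ y then
    h + (x - 1) * (h - 1) + (if PySem.Int.mod x 2 = 1 then h - 1 - y else y - 1)
  else h + (w - 1) * (h - 1) + (w - 1 - x)

/-- The grid, in B's iteration order. -/
def gridL (w h : Int) : List (Int × Int) :=
  (PySem.List.pyRange 0 w 1).flatMap (fun x => (PySem.List.pyRange 0 h 1).map (fun y => (x, y)))

/-- Entry (row y, column x) of a table, as an Option. -/
def get2 (o : List (List Int)) (y x : Nat) : Option Int := (o[y]?.getD [])[x]?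

/-- The update one table assignment `o[y][x] = v` performs. -/
def set2 (o : List (List Int)) (y x v : Int) : List (List Int) :=
  PySem.List.pySetD o y (PySem.List.pySetD (PySem.List.pyGetD o y []) x v)

-- ---- generic loop-shape lemmas ----

theorem foldl_nested_eq_flat {σ : Type} (xs ys : List Int) (F : σ → Int → Int → σ) (init : σ) :
    xs.foldl (fun s x => ys.foldl (fun s y => F s x y) s) init
      = (xs.flatMap (fun x => ys.map (fun y => (x, y)))).foldl (fun s b => F s b.1 b.2) init := by
  induction xs generalizing init with
  | nil => rfl
  | cons a xs ih =>
    simp only [List.foldl_cons, List.flatMap_cons, List.foldl_append, List.foldl_map]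
    exact ih _

theorem length_foldl_pySetD {α β : Type} (f : β → Int) (g : β → α) (L : List β) (init : List α) :
    (L.foldl (fun l b => PySem.List.pySetD l (f b) (g b)) init).length = init.length := by
  induction L generalizing init with
  | nil => rfl
  | cons b L ih => rw [List.foldl_cons, ih, PySem.List.length_pySetD]

theorem foldl_pySetD_frozen {α β : Type} (f : β → Int) (g : β → α) (L : List β) (init : List α)
    (hf : ∀ b ∈ L, 0 ≤ f b) (j : Nat) (hj : ∀ b ∈ L, (f b).toNat ≠ j) :
    (L.foldl (fun l b => PySem.List.pySetD l (f b) (g b)) init)[j]? = init[j]? := by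
  induction L generalizing init with
  | nil => rfl
  | cons b L ih =>
    rw [List.foldl_cons,
      ih (PySem.List.pySetD init (f b) (g b)) (fun c hc => hf c (List.mem_cons_of_mem _ hc))
        (fun c hc => hj c (List.mem_cons_of_mem _ hc)),
      PySem.List.pySetD_of_nonneg _ _ (hf b (by simp)), List.getElem?_set]
    simp [hj b (by simp)]

theorem foldl_pySetD_hit {α β : Type} (f : β → Int) (g : β → α) (L : List β) (init : List α)
    (hf : ∀ b ∈ L, 0 ≤ f b ∧ (f b).toNat < init.length) (j : Nat)
    (e : β) (he : e ∈ L) (hfe : (f e).toNat = j)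
    (hu : ∀ b ∈ L, (f b).toNat = j → b = e) :
    (L.foldl (fun l b => PySem.List.pySetD l (f b) (g b)) init)[j]? = some (g e) := by
  induction L generalizing init with
  | nil => cases he
  | cons b L ih =>
    by_cases hmem : e ∈ L
    · rw [List.foldl_cons]
      refine ih _ ?_ hmem (fun c hc hcj => hu c (List.mem_cons_of_mem _ hc) hcj)
      intro c hc
      have := hf c (List.mem_cons_of_mem _ hc)
      rwa [PySem.List.length_pySetD]
    · have heb : e = b := by
        rcases List.mem_cons.mp he with h | h
        · exact h
        · exact absurd h hmem
      subst heb
      have hmiss : ∀ c ∈ L, (f c).toNat ≠ j := by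
        intro c hc hcj
        exact hmem (hu c (List.mem_cons_of_mem _ hc) hcj ▸ hc)
      rw [List.foldl_cons,
        foldl_pySetD_frozen f g L _ (fun c hc => (hf c (List.mem_cons_of_mem _ hc)).1) j hmiss,
        PySem.List.pySetD_of_nonneg _ _ (hf e (by simp)).1, List.getElem?_set]
      have h2 := (hf e (by simp)).2
      simp [hfe, hfe ▸ h2]

theorem length_foldl_set2 {β : Type} (t u v : β → Int) (L : List β) (init : List (List Int)) :
    (L.foldl (fun o b => set2 o (t b) (u b) (v b)) init).length = init.length := by
  induction L generalizing init with
  | nil => rfl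
  | cons b L ih => rw [List.foldl_cons, ih]; simp [set2, PySem.List.length_pySetD]

theorem rows_foldl_set2 {β : Type} (t u v : β → Int) (L : List β) (init : List (List Int)) (W : Nat)
    (ht : ∀ b ∈ L, 0 ≤ t b ∧ (t b).toNat < init.length)
    (hrow : ∀ r ∈ init, r.length = W) :
    ∀ r ∈ L.foldl (fun o b => set2 o (t b) (u b) (v b)) init, r.length = W := by
  induction L generalizing init with
  | nil => exact hrow
  | cons b L ih =>
    rw [List.foldl_cons]
    have h0 := ht b (by simp)
    refine ih _ ?_ ?_
    · intro c hc
      have := ht c (List.mem_cons_of_mem _ hc)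
      constructor
      · exact this.1
      · simpa [set2, PySem.List.length_pySetD] using this.2
    · intro r hr
      have hlen : (PySem.List.pyGetD init (t b) []).length = W := by
        rw [PySem.List.pyGetD_eq_getElem _ _ h0.1 (by omega)]
        exact hrow _ (List.getElem_mem _)
      rw [set2, PySem.List.pySetD_of_nonneg _ _ h0.1] at hr
      rcases List.mem_or_eq_of_mem_set hr with h | h
      · exact hrow r h
      · rw [h, PySem.List.length_pySetD, hlen]

theorem foldl_set2_frozen {β : Type} (t u v : β → Int) (L : List β) (init : List (List Int))
    (ht : ∀ b ∈ L, 0 ≤ t b ∧ (t b).toNat < init.length ∧ 0 ≤ u b) (y x : Nat)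
    (hmiss : ∀ b ∈ L, ¬((t b).toNat = y ∧ (u b).toNat = x)) :
    get2 (L.foldl (fun o b => set2 o (t b) (u b) (v b)) init) y x = get2 init y x := by
  induction L generalizing init with
  | nil => rfl
  | cons b L ih =>
    have h0 := ht b (by simp)
    rw [List.foldl_cons,
      ih _ (fun c hc => by
          have := ht c (List.mem_cons_of_mem _ hc)
          refine ⟨this.1, ?_, this.2.2⟩
          simpa [set2, PySem.List.length_pySetD] using this.2.1)
        (fun c hc => hmiss c (List.mem_cons_of_mem _ hc))]
    have hb := hmiss b (by simp)
    by_cases hty : (t b).toNat = y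
    · subst hty
      have hux : (u b).toNat ≠ x := fun hx => hb ⟨rfl, hx⟩
      unfold get2 set2
      rw [PySem.List.pySetD_of_nonneg _ _ h0.1, List.getElem?_set, if_pos rfl, if_pos h0.2.1,
        Option.getD_some,
        PySem.List.pyGetD_eq_getElem _ _ h0.1 (by omega), PySem.List.pySetD_of_nonneg _ _ h0.2.2,
        List.getElem?_set, if_neg hux,
        List.getElem?_eq_getElem h0.2.1, Option.getD_some]
    · unfold get2 set2
      rw [PySem.List.pySetD_of_nonneg _ _ h0.1, List.getElem?_set, if_neg hty]

theorem foldl_set2_hit {β : Type} (t u v : β → Int) (L : List β) (init : List (List Int)) (W : Nat)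
    (ht : ∀ b ∈ L, 0 ≤ t b ∧ (t b).toNat < init.length ∧ 0 ≤ u b ∧ (u b).toNat < W)
    (hrow : ∀ r ∈ init, r.length = W) (y x : Nat)
    (e : β) (he : e ∈ L) (hey : (t e).toNat = y) (hex : (u e).toNat = x)
    (hu : ∀ b ∈ L, (t b).toNat = y → (u b).toNat = x → b = e) :
    get2 (L.foldl (fun o b => set2 o (t b) (u b) (v b)) init) y x = some (v e) := by
  induction L generalizing init with
  | nil => cases he
  | cons b L ih =>
    by_cases hmem : e ∈ L
    · rw [List.foldl_cons]
      refine ih _ ?_ ?_ hmem (fun c hc => hu c (List.mem_cons_of_mem _ hc))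
      · intro c hc
        have := ht c (List.mem_cons_of_mem _ hc)
        refine ⟨this.1, ?_, this.2.2⟩
        simpa [set2, PySem.List.length_pySetD] using this.2.1
      · refine rows_foldl_set2 t u v [b] init W ?_ hrow
        intro c hc
        simp only [List.mem_singleton] at hc
        subst hc
        exact ⟨(ht c (by simp)).1, (ht c (by simp)).2.1⟩
    · have heb : e = b := by
        rcases List.mem_cons.mp he with h | h
        · exact h
        · exact absurd h hmem
      subst heb
      have hmiss : ∀ c ∈ L, ¬((t c).toNat = y ∧ (u c).toNat = x) := by
        rintro c hc ⟨h1, h2⟩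
        exact hmem (hu c (List.mem_cons_of_mem _ hc) h1 h2 ▸ hc)
      have h0 := ht e (by simp)
      subst hey
      subst hex
      rw [List.foldl_cons,
        foldl_set2_frozen t u v L _ (fun c hc => by
            have := ht c (List.mem_cons_of_mem _ hc)
            refine ⟨this.1, ?_, this.2.2.1⟩
            simpa [set2, PySem.List.length_pySetD] using this.2.1) _ _ hmiss]
      unfold get2 set2
      have hr2 : (u e).toNat < (init[(t e).toNat]'h0.2.1).length := by
        rw [hrow _ (List.getElem_mem _)]
        exact h0.2.2.2
      rw [PySem.List.pySetD_of_nonneg _ _ h0.1, List.getElem?_set, if_pos rfl, if_pos h0.2.1,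
        Option.getD_some,
        PySem.List.pyGetD_eq_getElem _ _ h0.1 (by omega), PySem.List.pySetD_of_nonneg _ _ h0.2.2.1,
        List.getElem?_set, if_pos rfl, if_pos hr2]

theorem getElem?_flatMap_uniform {α β : Type} (l : List α) (g : α → List β) (m : Nat)
    (hm : ∀ x ∈ l, (g x).length = m) (j r : Nat) (hj : j < l.length) (hr : r < m) :
    (l.flatMap g)[j * m + r]? = (g l[j])[r]? := by
  induction l generalizing j with
  | nil => cases hj
  | cons a l ih =>
    have hlen : (g a).length = m := hm a (by simp)
    cases j with
    | zero =>
      rw [List.flatMap_cons, List.getElem?_append_left (by omega)]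
      simp
    | succ j =>
      have hmul : (j + 1) * m = j * m + m := by ring
      rw [List.flatMap_cons, List.getElem?_append_right (by omega)]
      have hidx : (j + 1) * m + r - (g a).length = j * m + r := by omega
      rw [hidx, ih (fun x hx => hm x (List.mem_cons_of_mem _ hx)) j (by simpa using hj)]
      simp

theorem length_flatMap_uniform {α β : Type} (l : List α) (g : α → List β) (m : Nat)
    (hm : ∀ x ∈ l, (g x).length = m) : (l.flatMap g).length = l.length * m := by
  rw [List.length_flatMap]
  have : l.map (fun a => (g a).length) = List.replicate l.length m := by
    rw [List.eq_replicate_iff]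
    constructor
    · simp
    · intro b hb
      obtain ⟨a, ha, rfl⟩ := List.mem_map.mp hb
      exact hm a ha
  rw [this, List.sum_replicate, smul_eq_mul]

-- ---- the two ports, rewritten into those shapes ----

theorem A_unfold (w h : Int) :
    build_hamiltonian_cycle w h =
      ((PySem.List.enumerate (pathSpec w h)).foldl
          (fun o p => set2 o p.2.2 p.2.1 p.1)
          (List.replicate h.toNat (List.replicate w.toNat (0 : Int))),
        pathSpec w h) := by
  unfold build_hamiltonian_cycle pathSpec set2
  simp only []
  rw [PySem.List.foldl_congr_mem (PySem.List.pyRange 0 w 1) _ (fun acc x => acc ++ colA h x) []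
      (by
        intro acc x _
        simp only []
        unfold colA
        split_ifs <;> rw [PySem.List.foldl_append_singleton_eq_map]),
    PySem.List.foldl_append_eq_flatMap (colA h) (PySem.List.pyRange 0 w 1) [],
    PySem.List.foldl_append_singleton_eq_map (fun x => (x, (0 : Int))) (PySem.List.pyRange (w - 1) 0 (-1)),
    List.nil_append]

theorem B_unfold (w h : Int) :
    build_hamiltonian_cycle_alt w h =
      ((gridL w h).foldl (fun o b => set2 o b.2 b.1 (idxZ w h b.1 b.2))
          (List.replicate h.toNat (List.replicate w.toNat (0 : Int))),
        (gridL w h).foldl (fun p b => PySem.List.pySetD p (idxZ w h b.1 b.2) (b.1, b.2))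
          (List.replicate (w * h).toNat ((-1 : Int), (-1 : Int)))) := by
  unfold build_hamiltonian_cycle_alt gridL idxZ set2
  simp only []
  rw [foldl_nested_eq_flat (PySem.List.pyRange 0 w 1) (PySem.List.pyRange 0 h 1)
      (F := fun s x y =>
        (PySem.List.pySetD s.1 y (PySem.List.pySetD (PySem.List.pyGetD s.1 y []) x
            (if x = 0 then y
             else if 1 ≤ y then
               h + (x - 1) * (h - 1) + (if PySem.Int.mod x 2 = 1 then h - 1 - y else y - 1)
             else h + (w - 1) * (h - 1) + (w - 1 - x))),
         PySem.List.pySetD s.2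
            (if x = 0 then y
             else if 1 ≤ y then
               h + (x - 1) * (h - 1) + (if PySem.Int.mod x 2 = 1 then h - 1 - y else y - 1)
             else h + (w - 1) * (h - 1) + (w - 1 - x)) (x, y)))]
  rw [PySem.List.foldl_prod_mk
      (f := fun o (b : Int × Int) => PySem.List.pySetD o b.2 (PySem.List.pySetD (PySem.List.pyGetD o b.2 []) b.1
            (if b.1 = 0 then b.2
             else if 1 ≤ b.2 then
               h + (b.1 - 1) * (h - 1) + (if PySem.Int.mod b.1 2 = 1 then h - 1 - b.2 else b.2 - 1)
             else h + (w - 1) * (h - 1) + (w - 1 - b.1))))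
      (g := fun p (b : Int × Int) => PySem.List.pySetD p
            (if b.1 = 0 then b.2
             else if 1 ≤ b.2 then
               h + (b.1 - 1) * (h - 1) + (if PySem.Int.mod b.1 2 = 1 then h - 1 - b.2 else b.2 - 1)
             else h + (w - 1) * (h - 1) + (w - 1 - b.1)) (b.1, b.2))]

theorem mem_gridL (w h : Int) (b : Int × Int) :
    b ∈ gridL w h ↔ (0 ≤ b.1 ∧ b.1 < w) ∧ (0 ≤ b.2 ∧ b.2 < h) := by
  unfold gridL
  simp only [List.mem_flatMap, List.mem_map, PySem.List.mem_pyRange_one]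
  constructor
  · rintro ⟨x, hx, y, hy, rfl⟩
    exact ⟨hx, hy⟩
  · rintro ⟨hx, hy⟩
    exact ⟨b.1, hx, b.2, hy, rfl⟩

-- ---- structure of pathSpec ----

theorem col0_length (H : Nat) : (colA (H : Int) 0).length = H := by
  unfold colA
  rw [if_pos rfl]
  simp only [List.length_map, PySem.List.length_pyRange_one]
  omega

theorem colA_length (H : Nat) (x : Int) (hx : 1 ≤ x) : (colA (H : Int) x).length = H - 1 := by
  unfold colA
  rw [if_neg (by omega)]
  split_ifs <;>
    simp only [List.length_map, PySem.List.length_pyRange_one, PySem.List.length_pyRange_neg_one] <;>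
    omega

theorem flat_split (W H : Nat) (hW : 2 ≤ W) :
    (PySem.List.pyRange 0 (W : Int) 1).flatMap (colA (H : Int)) =
      colA (H : Int) 0 ++ (PySem.List.pyRange 1 (W : Int) 1).flatMap (colA (H : Int)) := by
  rw [PySem.List.pyRange_one_cons (by omega), List.flatMap_cons]
  norm_num

theorem flat_len (W H : Nat) :
    ((PySem.List.pyRange 1 (W : Int) 1).flatMap (colA (H : Int))).length = (W - 1) * (H - 1) := by
  rw [length_flatMap_uniform _ _ (H - 1)
      (fun x hx => colA_length H x (PySem.List.mem_pyRange_one.mp hx).1),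
    PySem.List.length_pyRange_one]
  have e : ((W : Int) - 1).toNat = W - 1 := by omega
  rw [e]

theorem PA_len (W H : Nat) (hW : 2 ≤ W) (hH : 2 ≤ H) :
    (pathSpec (W : Int) (H : Int)).length = W * H := by
  obtain ⟨a, rfl⟩ : ∃ a, W = a + 1 := ⟨W - 1, by omega⟩
  obtain ⟨b, rfl⟩ : ∃ b, H = b + 1 := ⟨H - 1, by omega⟩
  unfold pathSpec
  rw [flat_split _ _ hW, List.length_append, List.length_append, col0_length, flat_len,
    List.length_map, PySem.List.length_pyRange_neg_one]
  have e : (((a + 1 : Nat) : Int) - 1 - 0).toNat = a := by omega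
  rw [e]
  have e2 : (a + 1) - 1 = a := rfl
  have e3 : (b + 1) - 1 = b := rfl
  rw [e2, e3]
  ring

theorem PA_get_first (W H : Nat) (hW : 2 ≤ W) (hH : 2 ≤ H) (k : Nat) (hk : k < H) :
    (pathSpec (W : Int) (H : Int))[k]? = some (0, (k : Int)) := by
  have hb1 : k < (colA (H : Int) 0 ++
      (PySem.List.pyRange 1 (W : Int) 1).flatMap (colA (H : Int))).length := by
    rw [List.length_append, col0_length, flat_len]; omega
  have hb0 : k < (colA (H : Int) 0).length := by rw [col0_length]; omega
  unfold pathSpec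
  rw [flat_split _ _ hW, List.getElem?_append_left hb1, List.getElem?_append_left hb0]
  unfold colA
  rw [if_pos rfl, List.getElem?_map, PySem.List.getElem?_pyRange_one,
    if_pos (show k < ((H : Int) - 0).toNat by omega)]
  simp

theorem PA_get_mid (W H : Nat) (hW : 2 ≤ W) (hH : 2 ≤ H) (j r : Nat)
    (hj : j < W - 1) (hr : r < H - 1) :
    (pathSpec (W : Int) (H : Int))[H + j * (H - 1) + r]? =
      some (1 + (j : Int),
        if (j + 1) % 2 = 1 then (H : Int) - 1 - (r : Int) else 1 + (r : Int)) := by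
  have hmul : (j + 1) * (H - 1) = j * (H - 1) + (H - 1) := by ring
  have hble : (j + 1) * (H - 1) ≤ (W - 1) * (H - 1) := Nat.mul_le_mul_right _ (by omega)
  have hlt : j * (H - 1) + r < (W - 1) * (H - 1) := by omega
  have hb1 : H + j * (H - 1) + r < (colA (H : Int) 0 ++
      (PySem.List.pyRange 1 (W : Int) 1).flatMap (colA (H : Int))).length := by
    rw [List.length_append, col0_length, flat_len]; omega
  have hb0 : (colA (H : Int) 0).length ≤ H + j * (H - 1) + r := by rw [col0_length]; omega
  unfold pathSpec
  rw [flat_split _ _ hW, List.getElem?_append_left hb1, List.getElem?_append_right hb0]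
  have hidx : H + j * (H - 1) + r - (colA (H : Int) 0).length = j * (H - 1) + r := by
    rw [col0_length]; omega
  rw [hidx,
    getElem?_flatMap_uniform _ _ (H - 1)
      (fun x hx => colA_length H x (PySem.List.mem_pyRange_one.mp hx).1) j r
      (by rw [PySem.List.length_pyRange_one]; omega) hr,
    PySem.List.getElem_pyRange_one]
  unfold colA
  rw [if_neg (by omega)]
  have hpar : PySem.Int.mod (1 + (j : Int)) 2 = 1 ↔ (j + 1) % 2 = 1 := by
    rw [PySem.Int.mod_eq_emod_of_pos (by norm_num)]
    omega
  by_cases hp : (j + 1) % 2 = 1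
  · rw [if_pos (hpar.mpr hp), if_pos hp, PySem.List.pyRange_neg_one, List.getElem?_map,
      List.getElem?_map]
    have hlen : r < (List.range ((H : Int) - 1 - 0).toNat).length := by simp; omega
    rw [List.getElem?_eq_getElem hlen]
    simp
  · rw [if_neg (fun hc => hp (hpar.mp hc)), if_neg hp, List.getElem?_map,
      PySem.List.getElem?_pyRange_one, if_pos (show r < ((H : Int) - 1).toNat by omega)]
    simp

theorem PA_get_tail (W H : Nat) (hW : 2 ≤ W) (_hH : 2 ≤ H) (k : Nat) (hk : k < W - 1) :
    (pathSpec (W : Int) (H : Int))[H + (W - 1) * (H - 1) + k]? =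
      some ((W : Int) - 1 - (k : Int), 0) := by
  have hb0 : (colA (H : Int) 0 ++
      (PySem.List.pyRange 1 (W : Int) 1).flatMap (colA (H : Int))).length ≤
      H + (W - 1) * (H - 1) + k := by
    rw [List.length_append, col0_length, flat_len]; omega
  unfold pathSpec
  rw [flat_split _ _ hW, List.getElem?_append_right hb0]
  have hidx : H + (W - 1) * (H - 1) + k -
      (colA (H : Int) 0 ++ (PySem.List.pyRange 1 (W : Int) 1).flatMap (colA (H : Int))).length = k := by
    rw [List.length_append, col0_length, flat_len]; omega
  rw [hidx, PySem.List.pyRange_neg_one, List.getElem?_map, List.getElem?_map]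
  have hlen : k < (List.range ((W : Int) - 1 - 0).toNat).length := by simp; omega
  rw [List.getElem?_eq_getElem hlen]
  simp

-- ---- the index formula inverts the path ----

theorem tot_eq (W H : Nat) (hW : 2 ≤ W) (hH : 2 ≤ H) :
    W * H = H + (W - 1) * (H - 1) + (W - 1) := by
  obtain ⟨a, rfl⟩ : ∃ a, W = a + 1 := ⟨W - 1, by omega⟩
  obtain ⟨b, rfl⟩ : ∃ b, H = b + 1 := ⟨H - 1, by omega⟩
  simp only [Nat.add_sub_cancel]
  ring

theorem idx_get (W H : Nat) (hW : 2 ≤ W) (hH : 2 ≤ H) (x y : Int)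
    (hx : 0 ≤ x ∧ x < (W : Int)) (hy : 0 ≤ y ∧ y < (H : Int)) :
    0 ≤ idxZ (W : Int) (H : Int) x y ∧ (idxZ (W : Int) (H : Int) x y).toNat < W * H ∧
      (pathSpec (W : Int) (H : Int))[(idxZ (W : Int) (H : Int) x y).toNat]? = some (x, y) := by
  obtain ⟨hx0, hx1⟩ := hx
  obtain ⟨hy0, hy1⟩ := hy
  have tot := tot_eq W H hW hH
  unfold idxZ
  by_cases hxz : x = 0
  · subst hxz
    rw [if_pos rfl]
    refine ⟨hy0, by omega, ?_⟩
    have hyk : y.toNat < H := by omega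
    rw [PA_get_first W H hW hH y.toNat hyk]
    simp only [Option.some_inj, Prod.mk.injEq]
    exact ⟨trivial, by omega⟩
  · rw [if_neg hxz]
    by_cases hy1' : 1 ≤ y
    · rw [if_pos hy1']
      have hjlt : (x - 1).toNat < W - 1 := by omega
      have hparx : PySem.Int.mod x 2 = 1 ↔ ((x - 1).toNat + 1) % 2 = 1 := by
        rw [PySem.Int.mod_eq_emod_of_pos (by norm_num)]
        omega
      have emul : (x - 1) * ((H : Int) - 1) = (((x - 1).toNat * (H - 1) : Nat) : Int) := by
        rw [Nat.cast_mul]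
        have e1 : ((H - 1 : Nat) : Int) = (H : Int) - 1 := by omega
        have e2 : (((x - 1).toNat : Nat) : Int) = x - 1 := by omega
        rw [e1, e2]
      have hble : ((x - 1).toNat + 1) * (H - 1) ≤ (W - 1) * (H - 1) :=
        Nat.mul_le_mul_right _ (by omega)
      have hmul : ((x - 1).toNat + 1) * (H - 1) = (x - 1).toNat * (H - 1) + (H - 1) := by ring
      by_cases hp : ((x - 1).toNat + 1) % 2 = 1
      · rw [if_pos (hparx.mpr hp)]
        have hrlt : ((H : Int) - 1 - y).toNat < H - 1 := by omega
        have efin : (H : Int) + (x - 1) * ((H : Int) - 1) + ((H : Int) - 1 - y) =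
            ((H + (x - 1).toNat * (H - 1) + ((H : Int) - 1 - y).toNat : Nat) : Int) := by
          rw [Nat.cast_add, Nat.cast_add, ← emul]
          omega
        rw [efin, Int.toNat_natCast, PA_get_mid W H hW hH _ _ hjlt hrlt, if_pos hp]
        refine ⟨by positivity, by omega, ?_⟩
        simp only [Option.some_inj, Prod.mk.injEq]
        constructor <;> omega
      · rw [if_neg (fun hc => hp (hparx.mp hc))]
        have hrlt : (y - 1).toNat < H - 1 := by omega
        have efin : (H : Int) + (x - 1) * ((H : Int) - 1) + (y - 1) =
            ((H + (x - 1).toNat * (H - 1) + (y - 1).toNat : Nat) : Int) := by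
          rw [Nat.cast_add, Nat.cast_add, ← emul]
          omega
        rw [efin, Int.toNat_natCast, PA_get_mid W H hW hH _ _ hjlt hrlt, if_neg hp]
        refine ⟨by positivity, by omega, ?_⟩
        simp only [Option.some_inj, Prod.mk.injEq]
        constructor <;> omega
    · rw [if_neg hy1']
      have hklt : ((W : Int) - 1 - x).toNat < W - 1 := by omega
      have emul : ((W : Int) - 1) * ((H : Int) - 1) = (((W - 1) * (H - 1) : Nat) : Int) := by
        rw [Nat.cast_mul]
        congr 1 <;> omega
      have efin : (H : Int) + ((W : Int) - 1) * ((H : Int) - 1) + ((W : Int) - 1 - x) =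
          ((H + (W - 1) * (H - 1) + ((W : Int) - 1 - x).toNat : Nat) : Int) := by
        rw [Nat.cast_add, Nat.cast_add, emul]
        omega
      rw [efin, Int.toNat_natCast, PA_get_tail W H hW hH _ hklt]
      refine ⟨by positivity, by omega, ?_⟩
      simp only [Option.some_inj, Prod.mk.injEq]
      constructor <;> omega

theorem idx_decomp (W H : Nat) (hW : 2 ≤ W) (hH : 2 ≤ H) (j : Nat) (hj : j < W * H) :
    ∃ x y : Int, (0 ≤ x ∧ x < (W : Int)) ∧ (0 ≤ y ∧ y < (H : Int)) ∧
      (idxZ (W : Int) (H : Int) x y).toNat = j ∧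
      (pathSpec (W : Int) (H : Int))[j]? = some (x, y) := by
  have tot := tot_eq W H hW hH
  by_cases h1 : j < H
  · refine ⟨0, (j : Int), ⟨le_refl 0, by omega⟩, ⟨by omega, by omega⟩, ?_, ?_⟩
    · unfold idxZ
      rw [if_pos rfl]
      omega
    · exact PA_get_first W H hW hH j h1
  · by_cases h2 : j < H + (W - 1) * (H - 1)
    · have hH1 : 0 < H - 1 := by omega
      obtain ⟨q, r, hrlt, hjlt, hdecomp⟩ :
          ∃ q r, r < H - 1 ∧ q < W - 1 ∧ H + q * (H - 1) + r = j := by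
        refine ⟨(j - H) / (H - 1), (j - H) % (H - 1), Nat.mod_lt _ hH1,
          (Nat.div_lt_iff_lt_mul hH1).mpr (by omega), ?_⟩
        have hdm := Nat.div_add_mod (j - H) (H - 1)
        have hcomm : (H - 1) * ((j - H) / (H - 1)) = ((j - H) / (H - 1)) * (H - 1) :=
          Nat.mul_comm _ _
        omega
      have hmid := PA_get_mid W H hW hH q r hjlt hrlt
      rw [hdecomp] at hmid
      have e3 : (((q : Nat) : Int) + 1 - 1) * ((H : Int) - 1) = ((q * (H - 1) : Nat) : Int) := by
        rw [Nat.cast_mul]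
        have e1 : ((H - 1 : Nat) : Int) = (H : Int) - 1 := by omega
        rw [e1]
        ring
      by_cases hp : (q + 1) % 2 = 1
      · refine ⟨((q : Nat) : Int) + 1, (H : Int) - 1 - ((r : Nat) : Int),
          ⟨by omega, by omega⟩, ⟨by omega, by omega⟩, ?_, ?_⟩
        · unfold idxZ
          rw [if_neg (by omega), if_pos (by omega),
            if_pos (by rw [PySem.Int.mod_eq_emod_of_pos (by norm_num)]; omega), e3]
          omega
        · rw [hmid, if_pos hp]
          simp only [Option.some_inj, Prod.mk.injEq]
          exact ⟨by omega, trivial⟩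
      · refine ⟨((q : Nat) : Int) + 1, ((r : Nat) : Int) + 1,
          ⟨by omega, by omega⟩, ⟨by omega, by omega⟩, ?_, ?_⟩
        · unfold idxZ
          rw [if_neg (by omega), if_pos (by omega),
            if_neg (by rw [PySem.Int.mod_eq_emod_of_pos (by norm_num)]; omega), e3]
          omega
        · rw [hmid, if_neg hp]
          simp only [Option.some_inj, Prod.mk.injEq]
          constructor <;> omega
    · have hklt : j - H - (W - 1) * (H - 1) < W - 1 := by omega
      have htail := PA_get_tail W H hW hH _ hklt
      have hjj : H + (W - 1) * (H - 1) + (j - H - (W - 1) * (H - 1)) = j := by omega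
      rw [hjj] at htail
      refine ⟨(W : Int) - 1 - ((j - H - (W - 1) * (H - 1) : Nat) : Int), 0,
        ⟨by omega, by omega⟩, ⟨le_refl 0, by omega⟩, ?_, ?_⟩
      · unfold idxZ
        rw [if_neg (by omega), if_neg (by omega)]
        have emul : ((W : Int) - 1) * ((H : Int) - 1) = (((W - 1) * (H - 1) : Nat) : Int) := by
          rw [Nat.cast_mul]
          congr 1 <;> omega
        rw [emul]
        omega
      · exact htail

-- ---- assembly ----

theorem list2_ext (o₁ o₂ : List (List Int)) (Hn Wn : Nat)
    (h1 : o₁.length = Hn) (h2 : o₂.length = Hn)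
    (r1 : ∀ r ∈ o₁, r.length = Wn) (r2 : ∀ r ∈ o₂, r.length = Wn)
    (hg : ∀ y0 < Hn, ∀ x0 < Wn, get2 o₁ y0 x0 = get2 o₂ y0 x0) : o₁ = o₂ := by
  apply List.ext_getElem?
  intro i
  by_cases hi : i < Hn
  · rw [List.getElem?_eq_getElem (show i < o₁.length by omega),
      List.getElem?_eq_getElem (show i < o₂.length by omega)]
    simp only [Option.some_inj]
    apply List.ext_getElem?
    intro x
    by_cases hx : x < Wn
    · have hgx := hg i hi x hx
      unfold get2 at hgx
      rw [List.getElem?_eq_getElem (show i < o₁.length by omega),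
        List.getElem?_eq_getElem (show i < o₂.length by omega)] at hgx
      simpa using hgx
    · rw [List.getElem?_eq_none
          (show (o₁[i]'(by omega)).length ≤ x by rw [r1 _ (List.getElem_mem _)]; omega),
        List.getElem?_eq_none
          (show (o₂[i]'(by omega)).length ≤ x by rw [r2 _ (List.getElem_mem _)]; omega)]
  · rw [List.getElem?_eq_none (show o₁.length ≤ i by omega),
      List.getElem?_eq_none (show o₂.length ≤ i by omega)]

theorem main_case (W H : Nat) (hW : 2 ≤ W) (hH : 2 ≤ H) :
    build_hamiltonian_cycle (W : Int) (H : Int) = build_hamiltonian_cycle_alt (W : Int) (H : Int) := by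
  have hn : ((W : Int) * (H : Int)).toNat = W * H := by
    rw [← Nat.cast_mul, Int.toNat_natCast]
  have hPAlen := PA_len W H hW hH
  have hgrid : ∀ b ∈ gridL (W : Int) (H : Int),
      (0 ≤ b.1 ∧ b.1 < (W : Int)) ∧ (0 ≤ b.2 ∧ b.2 < (H : Int)) :=
    fun b hb => (mem_gridL _ _ b).mp hb
  have hpath : (gridL (W : Int) (H : Int)).foldl
      (fun p b => PySem.List.pySetD p (idxZ (W : Int) (H : Int) b.1 b.2) (b.1, b.2))
      (List.replicate ((W : Int) * (H : Int)).toNat ((-1 : Int), (-1 : Int)))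
      = pathSpec (W : Int) (H : Int) := by
    have hfB : ∀ b ∈ gridL (W : Int) (H : Int), 0 ≤ idxZ (W : Int) (H : Int) b.1 b.2 ∧
        (idxZ (W : Int) (H : Int) b.1 b.2).toNat <
          (List.replicate ((W : Int) * (H : Int)).toNat ((-1 : Int), (-1 : Int))).length := by
      intro b hb
      have hbb := hgrid b hb
      have h3 := idx_get W H hW hH b.1 b.2 hbb.1 hbb.2
      exact ⟨h3.1, by rw [List.length_replicate, hn]; exact h3.2.1⟩
    apply List.ext_getElem?
    intro i
    by_cases hi : i < W * H
    · obtain ⟨x, y, hx, hy, hix, hPA⟩ := idx_decomp W H hW hH i hi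
      rw [hPA]
      refine foldl_pySetD_hit (fun b => idxZ (W : Int) (H : Int) b.1 b.2)
        (fun b => (b.1, b.2)) _ _ hfB i (x, y)
        ((mem_gridL _ _ (x, y)).mpr ⟨hx, hy⟩) hix ?_
      intro b hb hbj
      have hbb := hgrid b hb
      have hbg := (idx_get W H hW hH b.1 b.2 hbb.1 hbb.2).2.2
      rw [hbj, hPA] at hbg
      exact (Option.some.inj hbg).symm
    · rw [List.getElem?_eq_none
          (show (pathSpec (W : Int) (H : Int)).length ≤ i by rw [hPAlen]; omega)]
      apply List.getElem?_eq_none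
      rw [length_foldl_pySetD, List.length_replicate, hn]
      omega
  have hO : (List.replicate ((H : Int)).toNat
      (List.replicate ((W : Int)).toNat (0 : Int))).length = H := by
    rw [List.length_replicate]
    omega
  have hrowO : ∀ r ∈ List.replicate ((H : Int)).toNat
      (List.replicate ((W : Int)).toNat (0 : Int)), r.length = W := by
    intro r hr
    rw [(List.mem_replicate.mp hr).2, List.length_replicate]
    omega
  have hmemA : ∀ b ∈ PySem.List.enumerate (pathSpec (W : Int) (H : Int)),
      (0 ≤ b.2.1 ∧ b.2.1 < (W : Int)) ∧ (0 ≤ b.2.2 ∧ b.2.2 < (H : Int)) ∧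
        b.1 = idxZ (W : Int) (H : Int) b.2.1 b.2.2 := by
    intro b hb
    obtain ⟨k, hk, rfl⟩ := (PySem.List.mem_enumerate_iff _ _ b).mp hb
    have hkn : k < W * H := by rw [hPAlen] at hk; exact hk
    obtain ⟨x, y, hx, hy, hix, hPA⟩ := idx_decomp W H hW hH k hkn
    have hPAk : (pathSpec (W : Int) (H : Int))[k] = (x, y) := by
      rw [List.getElem?_eq_getElem hk] at hPA
      exact Option.some.inj hPA
    have hnn := (idx_get W H hW hH x y hx hy).1
    simp only [hPAk]
    exact ⟨hx, hy, by omega⟩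
  have horder : (PySem.List.enumerate (pathSpec (W : Int) (H : Int))).foldl
        (fun o p => set2 o p.2.2 p.2.1 p.1)
        (List.replicate ((H : Int)).toNat (List.replicate ((W : Int)).toNat (0 : Int)))
      = (gridL (W : Int) (H : Int)).foldl
        (fun o b => set2 o b.2 b.1 (idxZ (W : Int) (H : Int) b.1 b.2))
        (List.replicate ((H : Int)).toNat (List.replicate ((W : Int)).toNat (0 : Int))) := by
    have htA : ∀ b ∈ PySem.List.enumerate (pathSpec (W : Int) (H : Int)),
        0 ≤ b.2.2 ∧ (b.2.2).toNat < (List.replicate ((H : Int)).toNat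
          (List.replicate ((W : Int)).toNat (0 : Int))).length ∧
        0 ≤ b.2.1 ∧ (b.2.1).toNat < W := by
      intro b hb
      obtain ⟨hb1, hb2, -⟩ := hmemA b hb
      exact ⟨hb2.1, by rw [hO]; omega, hb1.1, by omega⟩
    have htB : ∀ b ∈ gridL (W : Int) (H : Int),
        0 ≤ b.2 ∧ (b.2).toNat < (List.replicate ((H : Int)).toNat
          (List.replicate ((W : Int)).toNat (0 : Int))).length ∧
        0 ≤ b.1 ∧ (b.1).toNat < W := by
      intro b hb
      have hbb := hgrid b hb
      exact ⟨hbb.2.1, by rw [hO]; omega, hbb.1.1, by omega⟩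
    apply list2_ext _ _ H W
    · rw [length_foldl_set2]
      exact hO
    · rw [length_foldl_set2]
      exact hO
    · exact rows_foldl_set2 _ _ _ _ _ W (fun b hb => ⟨(htA b hb).1, (htA b hb).2.1⟩) hrowO
    · exact rows_foldl_set2 _ _ _ _ _ W (fun b hb => ⟨(htB b hb).1, (htB b hb).2.1⟩) hrowO
    · intro y0 hy0 x0 hx0
      have hxb : 0 ≤ ((x0 : Nat) : Int) ∧ ((x0 : Nat) : Int) < (W : Int) := ⟨by omega, by omega⟩
      have hyb : 0 ≤ ((y0 : Nat) : Int) ∧ ((y0 : Nat) : Int) < (H : Int) := ⟨by omega, by omega⟩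
      have hig := idx_get W H hW hH (x0 : Int) (y0 : Int) hxb hyb
      have hPAi : (pathSpec (W : Int) (H : Int))[(idxZ (W : Int) (H : Int) (x0 : Int) (y0 : Int)).toNat]'(by rw [hPAlen]; exact hig.2.1) = ((x0 : Int), (y0 : Int)) := by
        have h22 := hig.2.2
        rw [List.getElem?_eq_getElem (show (idxZ (W : Int) (H : Int) (x0 : Int) (y0 : Int)).toNat <
          (pathSpec (W : Int) (H : Int)).length by rw [hPAlen]; exact hig.2.1)] at h22
        exact Option.some.inj h22
      have heA : ((idxZ (W : Int) (H : Int) (x0 : Int) (y0 : Int)), ((x0 : Int), (y0 : Int))) ∈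
          PySem.List.enumerate (pathSpec (W : Int) (H : Int)) := by
        apply (PySem.List.mem_enumerate_iff _ _ _).mpr
        refine ⟨(idxZ (W : Int) (H : Int) (x0 : Int) (y0 : Int)).toNat,
          by rw [hPAlen]; exact hig.2.1, ?_⟩
        rw [hPAi]
        exact Prod.ext (by have := hig.1; simp; omega) rfl
      have huA : ∀ b ∈ PySem.List.enumerate (pathSpec (W : Int) (H : Int)),
          (b.2.2).toNat = y0 → (b.2.1).toNat = x0 →
          b = ((idxZ (W : Int) (H : Int) (x0 : Int) (y0 : Int)), ((x0 : Int), (y0 : Int))) := by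
        intro b hb h1 h2
        obtain ⟨hb1, hb2, hb3⟩ := hmemA b hb
        have hx' : b.2.1 = (x0 : Int) := by omega
        have hy' : b.2.2 = (y0 : Int) := by omega
        have h1' : b.1 = idxZ (W : Int) (H : Int) (x0 : Int) (y0 : Int) := by
          rw [hb3, hx', hy']
        calc b = (b.1, (b.2.1, b.2.2)) := rfl
        _ = _ := by rw [h1', hx', hy']
      have huB : ∀ b ∈ gridL (W : Int) (H : Int),
          (b.2).toNat = y0 → (b.1).toNat = x0 → b = ((x0 : Int), (y0 : Int)) := by
        intro b hb h1 h2
        have hbb := hgrid b hb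
        have hx' : b.1 = (x0 : Int) := by omega
        have hy' : b.2 = (y0 : Int) := by omega
        calc b = (b.1, b.2) := rfl
        _ = _ := by rw [hx', hy']
      have hA := foldl_set2_hit (fun p : Int × (Int × Int) => p.2.2) (fun p => p.2.1)
        (fun p => p.1) (PySem.List.enumerate (pathSpec (W : Int) (H : Int))) _ W htA hrowO y0 x0
        _ heA (by simp) (by simp) huA
      have hB := foldl_set2_hit (fun b : Int × Int => b.2) (fun b => b.1)
        (fun b => idxZ (W : Int) (H : Int) b.1 b.2) (gridL (W : Int) (H : Int)) _ W htB hrowO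
        y0 x0 ((x0 : Int), (y0 : Int)) ((mem_gridL _ _ _).mpr ⟨hxb, hyb⟩) (by simp) (by simp) huB
      exact hA.trans hB.symm
  rw [A_unfold, B_unfold, hpath, horder]

-- ===== VERDICT (by name: the statement is the Claim_ definition above) =====
theorem build_hamiltonian_cycle_spec : Claim_equal_build_hamiltonian_cycle := by
  intro w h _ hpre
  unfold Pre_build_hamiltonian_cycle at hpre
  unfold Spec_build_hamiltonian_cycle
  obtain ⟨-, -, hcase⟩ := hpre
  rcases hcase with rfl | ⟨hneg, rfl⟩ | ⟨hw2, hh2⟩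
  · unfold build_hamiltonian_cycle build_hamiltonian_cycle_alt
    simp only [PySem.List.pyRange_one_eq_nil (le_refl (0 : Int)),
      PySem.List.pyRange_neg_one_eq_nil (show (0 : Int) - 1 ≤ 0 by norm_num)]
    simp [PySem.List.enumerate_nil]
  · unfold build_hamiltonian_cycle build_hamiltonian_cycle_alt
    simp only [PySem.List.pyRange_one_eq_nil (show w ≤ (0 : Int) by omega),
      PySem.List.pyRange_neg_one_eq_nil (show w - 1 ≤ (0 : Int) by omega)]
    simp [PySem.List.enumerate_nil]
  · obtain ⟨Wn, rfl⟩ : ∃ n : Nat, w = (n : Int) := ⟨w.toNat, by omega⟩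
    obtain ⟨Hn, rfl⟩ : ∃ n : Nat, h = (n : Int) := ⟨h.toNat, by omega⟩
    exact main_case Wn Hn (by omega) (by omega)
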